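-- pv_equiv track=rewrite | github.com/khugog/Sistema_Registro | consolidador.py | sugerir_columna_clave
-- ===== SOURCE A (Python) =====
-- def sugerir_columna_clave(columnas):
--     """Auto-detecta la mejor columna para usar como identificador único."""
--     palabras_fuertes = ['dni', 'documento', 'identidad', 'cedula', 'rut']
--     palabras_medias = ['id_', '_id', 'codigo', 'cod_']
--
--     columnas_lower = [str(c).lower() for c in columnas]
--
--     # 1. DNIs y Documentos
--     for i, col in enumerate(columnas_lower):
--         if any(p in col for p in palabras_fuertes):
--             return i
--
--     # 2. Códigos e IDs numéricos
--     for i, col in enumerate(columnas_lower):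
--         if any(p in col for p in palabras_medias):
--             return i
--
--     # 3. Nombre (Petición del usuario como respaldo, evitando "nombre_de_unidad" o similares)
--     for i, col in enumerate(columnas_lower):
--         if 'nombre' in col and 'unidad' not in col and 'cargo' not in col and 'posici' not in col:
--             return i
--
--     return 0 # Por defecto la primera si no halla similitud
-- ===== SOURCE B (Python) =====
-- def sugerir_columna_clave(columnas):
--     """Auto-detecta la mejor columna para usar como identificador unico."""
--     fuertes = ['dni', 'documento', 'identidad', 'cedula', 'rut']
--     medias = ['id_', '_id', 'codigo', 'cod_']
--     best_prio = 4
--     best_idx = 0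
--     for i, c in enumerate(columnas):
--         col = str(c).lower()
--         if any(p in col for p in fuertes):
--             prio = 1
--         elif any(p in col for p in medias):
--             prio = 2
--         elif 'nombre' in col and 'unidad' not in col and 'cargo' not in col and 'posici' not in col:
--             prio = 3
--         else:
--             continue
--         if prio < best_prio:
--             best_prio = prio
--             best_idx = i
--     return best_idx
-- ===== Notes on version B (the rewrite author's own statement) =====
-- stated objective: alternative
-- what changed: Replaces A's three sequential full scans over the lowered columns by a single pass that assigns each column a priority (1 strong keyword, 2 medium keyword, 3 'nombre' without exclusions) and keeps the first index achieving the lowest priority seen, defaulting to 0.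
import Mathlib
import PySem

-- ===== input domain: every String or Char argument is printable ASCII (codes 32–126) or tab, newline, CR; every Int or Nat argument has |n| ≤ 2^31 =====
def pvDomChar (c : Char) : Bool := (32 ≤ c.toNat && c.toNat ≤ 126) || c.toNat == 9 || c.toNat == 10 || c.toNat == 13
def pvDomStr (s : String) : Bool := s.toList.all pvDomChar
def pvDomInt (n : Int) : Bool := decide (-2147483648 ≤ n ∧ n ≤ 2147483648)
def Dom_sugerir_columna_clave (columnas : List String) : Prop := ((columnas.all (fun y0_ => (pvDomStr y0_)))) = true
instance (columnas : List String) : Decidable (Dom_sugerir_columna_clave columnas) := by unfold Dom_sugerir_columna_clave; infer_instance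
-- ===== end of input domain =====

-- B replaces A's three sequential full scans by one pass that scores every column
-- (priority 1/2/3) and keeps the first index of the lowest priority seen (objective: alternative).

-- ===== PORT A =====
def pvFuertes : List String := ["dni", "documento", "identidad", "cedula", "rut"]
def pvMedias : List String := ["id_", "_id", "codigo", "cod_"]

-- loop 1: first column containing a strong keyword
def pvLoop1 : List String → Nat → Option Nat
  | [], _ => none
  | col :: rest, i =>
    if pvFuertes.any (fun p => PySem.Str.isIn p col) then some i else pvLoop1 rest (i + 1)

-- loop 2: first column containing a medium keyword
def pvLoop2 : List String → Nat → Option Nat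
  | [], _ => none
  | col :: rest, i =>
    if pvMedias.any (fun p => PySem.Str.isIn p col) then some i else pvLoop2 rest (i + 1)

-- loop 3: first column containing 'nombre' and none of the exclusions
def pvLoop3 : List String → Nat → Option Nat
  | [], _ => none
  | col :: rest, i =>
    if PySem.Str.isIn "nombre" col && !(PySem.Str.isIn "unidad" col)
        && !(PySem.Str.isIn "cargo" col) && !(PySem.Str.isIn "posici" col)
      then some i else pvLoop3 rest (i + 1)

def sugerir_columna_clave (columnas : List String) : Int :=
  let columnas_lower := columnas.map (fun c => PySem.Str.lower c)
  match pvLoop1 columnas_lower 0 with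
  | some i => (i : Int)
  | none =>
    match pvLoop2 columnas_lower 0 with
    | some i => (i : Int)
    | none =>
      match pvLoop3 columnas_lower 0 with
      | some i => (i : Int)
      | none => 0

-- ===== PORT B =====
-- single pass: state (i, best_prio, best_idx); 'continue' = keep the state unchanged
def pvLoopB : List String → Nat → Nat → Nat → Nat
  | [], _, _, best_idx => best_idx
  | c :: rest, i, best_prio, best_idx =>
    let col := PySem.Str.lower c
    if pvFuertes.any (fun p => PySem.Str.isIn p col) then
      if 1 < best_prio then pvLoopB rest (i + 1) 1 i else pvLoopB rest (i + 1) best_prio best_idx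
    else if pvMedias.any (fun p => PySem.Str.isIn p col) then
      if 2 < best_prio then pvLoopB rest (i + 1) 2 i else pvLoopB rest (i + 1) best_prio best_idx
    else if PySem.Str.isIn "nombre" col && !(PySem.Str.isIn "unidad" col)
        && !(PySem.Str.isIn "cargo" col) && !(PySem.Str.isIn "posici" col) then
      if 3 < best_prio then pvLoopB rest (i + 1) 3 i else pvLoopB rest (i + 1) best_prio best_idx
    else
      pvLoopB rest (i + 1) best_prio best_idx

def sugerir_columna_clave_alt (columnas : List String) : Int :=
  (pvLoopB columnas 0 4 0 : Int)

-- ===== PRECONDITION & SPEC =====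
def Spec_sugerir_columna_clave (columnas : List String) (out : Int) : Prop := out = sugerir_columna_clave_alt columnas
instance (columnas : List String) (out : Int) : Decidable (Spec_sugerir_columna_clave columnas out) := by unfold Spec_sugerir_columna_clave; infer_instance

-- ===== CLAIM (what is proved, stated in full; the proofs are below) =====
def Claim_equal_sugerir_columna_clave : Prop := ∀ (columnas : List String), Dom_sugerir_columna_clave columnas → Spec_sugerir_columna_clave columnas (sugerir_columna_clave columnas)

-- ===== LEMMAS AND PROOFS =====

-- B's one-pass loop computes, on the lowered list, exactly the three-tier first match
-- of A, relative to the running best (best_prio, best_idx).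
theorem pvLoopB_eq (M : List String) : ∀ (i bp bi : Nat),
    pvLoopB M i bp bi =
      (match pvLoop1 (M.map (fun c => PySem.Str.lower c)) i with
       | some j => if 1 < bp then j else bi
       | none =>
         match pvLoop2 (M.map (fun c => PySem.Str.lower c)) i with
         | some j => if 2 < bp then j else bi
         | none =>
           match pvLoop3 (M.map (fun c => PySem.Str.lower c)) i with
           | some j => if 3 < bp then j else bi
           | none => bi) := by
  induction M with
  | nil => intro i bp bi; simp [pvLoopB, pvLoop1, pvLoop2, pvLoop3]
  | cons c rest ih =>
    intro i bp bi
    simp only [pvLoopB, pvLoop1, pvLoop2, pvLoop3, List.map]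
    split_ifs <;>
      (try rw [ih]) <;>
      rcases hl1 : pvLoop1 (rest.map (fun c => PySem.Str.lower c)) (i + 1) with _ | j1 <;>
      rcases hl2 : pvLoop2 (rest.map (fun c => PySem.Str.lower c)) (i + 1) with _ | j2 <;>
      rcases hl3 : pvLoop3 (rest.map (fun c => PySem.Str.lower c)) (i + 1) with _ | j3 <;>
      simp only [hl1, hl2, hl3] <;> split_ifs <;> omega

-- ===== VERDICT (by name: the statement is the Claim_ definition above) =====
theorem sugerir_columna_clave_spec : Claim_equal_sugerir_columna_clave := by
  intro columnas _
  unfold Spec_sugerir_columna_clave sugerir_columna_clave sugerir_columna_clave_alt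
  rw [pvLoopB_eq]
  rcases h1 : pvLoop1 (columnas.map (fun c => PySem.Str.lower c)) 0 with _ | j1 <;>
    rcases h2 : pvLoop2 (columnas.map (fun c => PySem.Str.lower c)) 0 with _ | j2 <;>
    rcases h3 : pvLoop3 (columnas.map (fun c => PySem.Str.lower c)) 0 with _ | j3 <;>
    simp [h1, h2, h3]
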